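-- pv_equiv track=rewrite | github.com/Maxibunny/My-simple-methods | 9_task_sessia.py | my_rfind
-- ===== SOURCE A (Python) =====
-- def my_rfind(s, ch):
--     '''
--     Метод rfind() возвращает наивысший индекс
--     подстроки (если найден).
--     Если не найден, возвращается -1.
--     '''
--     if ch in s:
--         i=len(s)-1
--         while i>=0 and s[i]!=ch:
--             i-=1
--         return i
--     else:
--         return -1
-- ===== SOURCE B (Python) =====
-- def my_rfind(s, ch):
--     result = -1
--     for i, c in enumerate(s):
--         if c == ch:
--             result = i
--     return result
-- ===== Notes on version B (the rewrite author's own statement) =====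
-- stated objective: simpler
-- what changed: Replaced A's membership pre-check plus backward early-exit while-loop with a single forward enumerate pass that keeps the last matching index in an accumulator.
import Mathlib
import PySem

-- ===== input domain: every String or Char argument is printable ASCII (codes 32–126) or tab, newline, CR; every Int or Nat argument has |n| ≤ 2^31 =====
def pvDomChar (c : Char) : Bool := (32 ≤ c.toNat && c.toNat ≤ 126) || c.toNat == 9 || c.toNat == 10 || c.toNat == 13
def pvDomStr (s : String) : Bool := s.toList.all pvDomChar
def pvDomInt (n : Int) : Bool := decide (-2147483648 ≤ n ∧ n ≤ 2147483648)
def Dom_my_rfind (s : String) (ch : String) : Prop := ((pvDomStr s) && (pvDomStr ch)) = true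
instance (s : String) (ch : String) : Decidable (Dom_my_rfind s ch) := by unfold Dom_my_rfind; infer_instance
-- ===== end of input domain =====

-- B changes the decomposition: one forward accumulating pass instead of A's membership
-- pre-check + backward early-exit scan; same O(n) cost, simpler shape.

-- ===== PORT A =====
-- the 'while i>=0 and s[i]!=ch: i-=1' loop; the Nat argument is i+1 (0 = loop exited with i = -1)
def my_rfind_loop (l : List Char) (ch : String) : Nat → Int
  | 0 => -1
  | Nat.succ n => if String.ofList [l.getD n ' '] ≠ ch then my_rfind_loop l ch n else (n : Int)

def my_rfind (s : String) (ch : String) : Int :=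
  if PySem.Str.isIn ch s then my_rfind_loop s.toList ch s.toList.length else -1

-- ===== PORT B =====
def my_rfind_alt (s : String) (ch : String) : Int :=
  (PySem.List.enumerate s.toList).foldl
    (fun result p => if String.ofList [p.2] = ch then p.1 else result) (-1)

-- ===== PRECONDITION & SPEC =====
def Spec_my_rfind (s : String) (ch : String) (out : Int) : Prop := out = my_rfind_alt s ch
instance (s : String) (ch : String) (out : Int) : Decidable (Spec_my_rfind s ch out) := by unfold Spec_my_rfind; infer_instance

-- ===== CLAIM (what is proved, stated in full; the proofs are below) =====
def Claim_equal_my_rfind : Prop := ∀ (s : String) (ch : String), Dom_my_rfind s ch → Spec_my_rfind s ch (my_rfind s ch)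

-- ===== LEMMAS AND PROOFS =====

-- B's fold, starting from an arbitrary accumulator, abstracted over the enumerate start
def altFold (l : List Char) (ch : String) (start acc : Int) : Int :=
  (PySem.List.enumerate l start).foldl
    (fun result p => if String.ofList [p.2] = ch then p.1 else result) acc

theorem altFold_append (l : List Char) (c : Char) (ch : String) (start acc : Int) :
    altFold (l ++ [c]) ch start acc =
      (if String.ofList [c] = ch then start + l.length else altFold l ch start acc) := by
  simp [altFold, PySem.List.enumerate_append, PySem.List.enumerate_cons]

theorem my_rfind_loop_append (l : List Char) (c : Char) (ch : String) :
    ∀ n, n ≤ l.length → my_rfind_loop (l ++ [c]) ch n = my_rfind_loop l ch n := by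
  intro n
  induction n with
  | zero => intro _; rfl
  | succ m ih =>
      intro h
      have hm : m < l.length := by omega
      simp [my_rfind_loop, List.getD, List.getElem?_append_left hm, ih (by omega)]

-- the loop from the end of the list equals B's fold (for any enumerate start / matching accumulator shift)
theorem loop_eq_fold (ch : String) (l : List Char) :
    my_rfind_loop l ch l.length = altFold l ch 0 (-1) := by
  induction l using List.reverseRecOn with
  | nil => rfl
  | append_singleton l c ih =>
      rw [altFold_append]
      have h1 : my_rfind_loop (l ++ [c]) ch (l ++ [c]).length =
          if String.ofList [c] ≠ ch then my_rfind_loop (l ++ [c]) ch l.length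
          else (l.length : Int) := by
        have hlen : (l ++ [c]).length = l.length + 1 := by simp
        rw [hlen]
        simp [my_rfind_loop, List.getD]
      rw [h1, my_rfind_loop_append l c ch l.length (le_refl _), ih]
      by_cases h : String.ofList [c] = ch <;> simp [h]

-- if no character of l matches ch, B's fold stays at its accumulator
theorem altFold_no_match (ch : String) (l : List Char) (start acc : Int)
    (h : ∀ c ∈ l, String.ofList [c] ≠ ch) : altFold l ch start acc = acc := by
  induction l generalizing start with
  | nil => rfl
  | cons c t ih =>
      have hc := h c (List.mem_cons_self ..)
      simp only [altFold, PySem.List.enumerate_cons, List.foldl_cons, if_neg hc] at *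
      exact ih (start + 1) (fun x hx => h x (List.mem_cons_of_mem _ hx))

theorem my_rfind_eq (s ch : String) : my_rfind s ch = my_rfind_alt s ch := by
  unfold my_rfind
  by_cases h : PySem.Str.isIn ch s = true
  · rw [if_pos h]
    exact loop_eq_fold ch s.toList
  · rw [if_neg h]
    have hno : ∀ c ∈ s.toList, String.ofList [c] ≠ ch := by
      intro c hc hEq
      apply h
      rw [PySem.Str.isIn_iff_infix, ← hEq]
      obtain ⟨u, v, huv⟩ := List.append_of_mem hc
      exact ⟨u, v, by simp [huv]⟩
    exact (altFold_no_match ch s.toList 0 (-1) hno).symm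

-- ===== VERDICT (by name: the statement is the Claim_ definition above) =====
theorem my_rfind_spec : Claim_equal_my_rfind := by
  intro s ch _
  exact my_rfind_eq s ch
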